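-- pv_equiv track=rewrite | github.com/shadaashraf/Simple-scanner-compiler- | main.py | positional_intersect
-- ===== SOURCE A (Python) =====
-- def positional_intersect(pos_list_1, pos_list_2, k):
--     ans = []
--     for file_id in pos_list_1.keys():
--         if file_id in pos_list_2.keys():
--             list_1 = pos_list_1[file_id]
--             list_2 = pos_list_2[file_id]
--
--             for pos1 in list_1:
--                 for pos2 in list_2:
--                     if pos2 - pos1 == k:  # or pos1 - pos2 == k :
--                         if file_id not in ans:
--                             ans.append(file_id)
--
--                         break
--     return ans
-- ===== SOURCE B (Python) =====
-- def positional_intersect(pos_list_1, pos_list_2, k):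
--     ans = []
--     for file_id in pos_list_1.keys():
--         if file_id in pos_list_2:
--             xs = sorted(pos_list_1[file_id])
--             ys = sorted(pos_list_2[file_id])
--             i = j = 0
--             while i < len(xs) and j < len(ys):
--                 d = ys[j] - xs[i]
--                 if d == k:
--                     ans.append(file_id)
--                     break
--                 if d < k:
--                     j += 1
--                 else:
--                     i += 1
--     return ans
-- ===== Notes on version B (the rewrite author's own statement) =====
-- stated objective: alternative
-- what changed: replaces A's nested all-pairs scan (with break and an 'in ans' re-scan) by a two-pointer merge over sorted copies of the two position lists, advancing whichever pointer makes the difference move toward k and appending the key directly (keys are unique)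
import Mathlib
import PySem

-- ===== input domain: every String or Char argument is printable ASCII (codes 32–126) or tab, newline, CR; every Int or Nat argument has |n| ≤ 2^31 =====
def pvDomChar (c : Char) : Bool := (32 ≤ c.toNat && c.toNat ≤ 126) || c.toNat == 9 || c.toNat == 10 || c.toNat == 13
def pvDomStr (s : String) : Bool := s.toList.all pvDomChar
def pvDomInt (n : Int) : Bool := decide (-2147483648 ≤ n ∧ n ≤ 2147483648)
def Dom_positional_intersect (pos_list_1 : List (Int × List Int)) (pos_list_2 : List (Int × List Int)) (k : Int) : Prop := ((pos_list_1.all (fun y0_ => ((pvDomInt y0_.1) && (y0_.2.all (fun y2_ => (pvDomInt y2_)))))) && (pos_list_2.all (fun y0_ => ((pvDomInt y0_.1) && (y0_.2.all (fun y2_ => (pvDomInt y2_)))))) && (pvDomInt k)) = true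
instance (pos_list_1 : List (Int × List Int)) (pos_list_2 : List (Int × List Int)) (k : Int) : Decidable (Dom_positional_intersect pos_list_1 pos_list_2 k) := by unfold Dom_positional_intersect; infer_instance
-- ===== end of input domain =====

-- B replaces the nested all-pairs scan by a two-pointer merge over sorted copies of both position lists (alternative algorithm; inputs are not mutated by either version).

-- ===== PORT A =====
-- 'for pos2 in list_2: if pos2 - pos1 == k: (append if absent); break' — the break stops at the first match
def pvInnerA (k fid pos1 : Int) (l2 ans : List Int) : List Int :=
  match l2 with
  | [] => ans
  | pos2 :: rest =>
      if pos2 - pos1 == k then (if ans.contains fid then ans else ans ++ [fid])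
      else pvInnerA k fid pos1 rest ans

def positional_intersect (pos_list_1 : List (Int × List Int)) (pos_list_2 : List (Int × List Int)) (k : Int) : List Int :=
  let d1 := PySem.Dict.ofList pos_list_1
  let d2 := PySem.Dict.ofList pos_list_2
  d1.keys.foldl (fun ans fid =>
    if d2.contains fid then
      let list_1 := d1.getD fid []
      let list_2 := d2.getD fid []
      list_1.foldl (fun ans pos1 => pvInnerA k fid pos1 list_2 ans) ans
    else ans) []

-- ===== PORT B =====
-- the while loop over indices i (into xs) and j (into ys): advancing an index = dropping the head of its suffix
def pvTwoPtr (k : Int) (xs ys : List Int) : Bool :=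
  match xs, ys with
  | x :: xs', y :: ys' =>
      if y - x == k then true
      else if y - x < k then pvTwoPtr k (x :: xs') ys'
      else pvTwoPtr k xs' (y :: ys')
  | _, _ => false
termination_by xs.length + ys.length

def positional_intersect_alt (pos_list_1 : List (Int × List Int)) (pos_list_2 : List (Int × List Int)) (k : Int) : List Int :=
  let d1 := PySem.Dict.ofList pos_list_1
  let d2 := PySem.Dict.ofList pos_list_2
  d1.keys.foldl (fun ans fid =>
    if d2.contains fid then
      let xs := PySem.List.sorted (d1.getD fid []) (fun x => x) false
      let ys := PySem.List.sorted (d2.getD fid []) (fun x => x) false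
      if pvTwoPtr k xs ys then ans ++ [fid] else ans
    else ans) []

-- ===== PRECONDITION & SPEC =====
def Spec_positional_intersect (pos_list_1 : List (Int × List Int)) (pos_list_2 : List (Int × List Int)) (k : Int) (out : List Int) : Prop := out = positional_intersect_alt pos_list_1 pos_list_2 k
instance (pos_list_1 : List (Int × List Int)) (pos_list_2 : List (Int × List Int)) (k : Int) (out : List Int) : Decidable (Spec_positional_intersect pos_list_1 pos_list_2 k out) := by unfold Spec_positional_intersect; infer_instance

-- ===== CLAIM (what is proved, stated in full; the proofs are below) =====
def Claim_equal_positional_intersect : Prop := ∀ (pos_list_1 : List (Int × List Int)) (pos_list_2 : List (Int × List Int)) (k : Int), Dom_positional_intersect pos_list_1 pos_list_2 k → Spec_positional_intersect pos_list_1 pos_list_2 k (positional_intersect pos_list_1 pos_list_2 k)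

-- ===== LEMMAS AND PROOFS =====

-- append-if-absent, the net effect of A's guarded append
def pvApp1 (ans : List Int) (fid : Int) : List Int :=
  if ans.contains fid then ans else ans ++ [fid]

theorem pvInnerA_eq (k fid pos1 : Int) (l2 ans : List Int) :
    pvInnerA k fid pos1 l2 ans =
      if l2.any (fun pos2 => pos2 - pos1 == k) then pvApp1 ans fid else ans := by
  induction l2 with
  | nil => simp [pvInnerA]
  | cons p rest ih =>
      rw [pvInnerA, List.any_cons]
      by_cases h : p - pos1 == k
      · rw [if_pos h, h, Bool.true_or, if_pos rfl, pvApp1]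
      · rw [if_neg h, ih, Bool.eq_false_iff.mpr h, Bool.false_or]

theorem pvApp1_contains (ans : List Int) (fid : Int) : (pvApp1 ans fid).contains fid = true := by
  unfold pvApp1
  by_cases h : ans.contains fid
  · rwa [if_pos h]
  · rw [if_neg h]; simp

theorem pvApp1_idem (ans : List Int) (fid : Int) : pvApp1 (pvApp1 ans fid) fid = pvApp1 ans fid := by
  conv_lhs => rw [pvApp1]
  rw [if_pos (pvApp1_contains ans fid)]

theorem pvMiddle_eq (k fid : Int) (l1 l2 ans : List Int) :
    l1.foldl (fun ans pos1 => pvInnerA k fid pos1 l2 ans) ans =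
      if l1.any (fun p1 => l2.any (fun p2 => p2 - p1 == k)) then pvApp1 ans fid else ans := by
  induction l1 generalizing ans with
  | nil => simp
  | cons p rest ih =>
      rw [List.foldl_cons, pvInnerA_eq, List.any_cons]
      by_cases h : l2.any (fun p2 => p2 - p == k)
      · rw [if_pos h, ih, h, Bool.true_or, if_pos rfl]
        by_cases h2 : rest.any (fun p1 => l2.any fun p2 => p2 - p1 == k)
        · rw [if_pos h2, pvApp1_idem]
        · rw [if_neg h2]
      · rw [if_neg h, ih, Bool.eq_false_iff.mpr h, Bool.false_or]

-- two-pointer correctness on sorted lists: it decides the existence of a pair at distance k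
theorem pvTwoPtr_iff (k : Int) (xs ys : List Int)
    (hx : xs.Pairwise (· ≤ ·)) (hy : ys.Pairwise (· ≤ ·)) :
    pvTwoPtr k xs ys = true ↔ ∃ x ∈ xs, ∃ y ∈ ys, y - x = k := by
  induction xs, ys using pvTwoPtr.induct k with
  | case1 x xs' y ys' hk =>
      rw [pvTwoPtr, if_pos hk]
      exact ⟨fun _ => ⟨x, by simp, y, by simp, by simpa using hk⟩, fun _ => rfl⟩
  | case2 x xs' y ys' hk hlt ih =>
      have hk' : y - x ≠ k := by simpa using hk
      rw [pvTwoPtr, if_neg hk, if_pos hlt, ih hx (List.Pairwise.sublist (by simp) hy)]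
      constructor
      · rintro ⟨a, ha, b, hb, hab⟩; exact ⟨a, ha, b, by simp [hb], hab⟩
      · rintro ⟨a, ha, b, hb, hab⟩
        rcases List.mem_cons.mp hb with rfl | hb'
        · -- b = y cannot be the witness: a ≥ x so b - a ≤ y - x < k
          exfalso
          have hxa : x ≤ a := by
            rcases List.mem_cons.mp ha with rfl | ha'
            · exact le_refl a
            · exact (List.pairwise_cons.mp hx).1 a ha'
          omega
        · exact ⟨a, ha, b, hb', hab⟩
  | case3 x xs' y ys' hk hlt ih =>
      have hk' : y - x ≠ k := by simpa using hk
      rw [pvTwoPtr, if_neg hk, if_neg hlt,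
        ih (List.Pairwise.sublist (by simp) hx) hy]
      constructor
      · rintro ⟨a, ha, b, hb, hab⟩; exact ⟨a, by simp [ha], b, hb, hab⟩
      · rintro ⟨a, ha, b, hb, hab⟩
        rcases List.mem_cons.mp ha with rfl | ha'
        · -- a = x cannot be the witness: b ≥ y so b - a ≥ y - x > k
          exfalso
          have hyb : y ≤ b := by
            rcases List.mem_cons.mp hb with rfl | hb'
            · exact le_refl b
            · exact (List.pairwise_cons.mp hy).1 b hb'
          omega
        · exact ⟨a, ha', b, hb, hab⟩
  | case4 xs ys h =>
      cases xs with
      | nil => simp [pvTwoPtr]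
      | cons x xs' =>
        cases ys with
        | nil => simp [pvTwoPtr]
        | cons y ys' => exact (h x xs' y ys' rfl rfl).elim

theorem pvCond_eq (k : Int) (l1 l2 : List Int) :
    (l1.any (fun p1 => l2.any (fun p2 => p2 - p1 == k))) =
      pvTwoPtr k (PySem.List.sorted l1 (fun x => x) false) (PySem.List.sorted l2 (fun x => x) false) := by
  rw [Bool.eq_iff_iff, pvTwoPtr_iff k _ _
    (by simpa using PySem.List.sorted_pairwise l1 (fun x => x))
    (by simpa using PySem.List.sorted_pairwise l2 (fun x => x))]
  simp only [List.any_eq_true, beq_iff_eq, PySem.List.mem_sorted]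

theorem pvFold_eq (c : Int → Bool) (keys ans : List Int) (hnd : keys.Nodup)
    (hfr : ∀ f ∈ keys, ¬ f ∈ ans) :
    keys.foldl (fun a fid => if c fid then pvApp1 a fid else a) ans =
      keys.foldl (fun a fid => if c fid then a ++ [fid] else a) ans := by
  induction keys generalizing ans with
  | nil => rfl
  | cons f rest ih =>
      simp only [List.foldl_cons]
      have hf : ¬ f ∈ ans := hfr f (by simp)
      have hnd' : rest.Nodup := (List.nodup_cons.mp hnd).2
      have hne : f ∉ rest := (List.nodup_cons.mp hnd).1
      by_cases hc : c f
      · rw [if_pos hc, if_pos hc]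
        have hap : pvApp1 ans f = ans ++ [f] := by
          rw [pvApp1, if_neg (by simpa [List.contains_iff_mem] using hf)]
        rw [hap]
        exact ih _ hnd' (fun g hg => by
          simp only [List.mem_append, List.mem_singleton]
          rintro (h | rfl)
          · exact hfr g (by simp [hg]) h
          · exact hne hg)
      · rw [if_neg hc, if_neg hc]
        exact ih _ hnd' (fun g hg => hfr g (by simp [hg]))

theorem pvMain (d1 d2 : PySem.Dict Int (List Int)) (k : Int) (hnd : d1.keys.Nodup) :
    d1.keys.foldl (fun ans fid =>
      if d2.contains fid then
        (d1.getD fid []).foldl (fun ans pos1 => pvInnerA k fid pos1 (d2.getD fid []) ans) ans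
      else ans) [] =
    d1.keys.foldl (fun ans fid =>
      if d2.contains fid then
        if pvTwoPtr k (PySem.List.sorted (d1.getD fid []) (fun x => x) false)
            (PySem.List.sorted (d2.getD fid []) (fun x => x) false)
          then ans ++ [fid] else ans
      else ans) [] := by
  have hA : (fun (ans : List Int) (fid : Int) =>
      if d2.contains fid then
        (d1.getD fid []).foldl (fun ans pos1 => pvInnerA k fid pos1 (d2.getD fid []) ans) ans
      else ans) =
      (fun a fid =>
        if (d2.contains fid && pvTwoPtr k (PySem.List.sorted (d1.getD fid []) (fun x => x) false)
            (PySem.List.sorted (d2.getD fid []) (fun x => x) false)) then pvApp1 a fid else a) := by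
    funext a fid
    by_cases hc : d2.contains fid
    · rw [if_pos hc, pvMiddle_eq, pvCond_eq, hc, Bool.true_and]
    · rw [if_neg hc, Bool.eq_false_iff.mpr hc, Bool.false_and, if_neg (by simp)]
  have hB : (fun (a : List Int) (fid : Int) =>
      if d2.contains fid then
        if pvTwoPtr k (PySem.List.sorted (d1.getD fid []) (fun x => x) false)
            (PySem.List.sorted (d2.getD fid []) (fun x => x) false)
          then a ++ [fid] else a
      else a) =
      (fun a fid =>
        if (d2.contains fid && pvTwoPtr k (PySem.List.sorted (d1.getD fid []) (fun x => x) false)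
            (PySem.List.sorted (d2.getD fid []) (fun x => x) false)) then a ++ [fid] else a) := by
    funext a fid
    by_cases hc : d2.contains fid
    · simp only [hc, if_pos, Bool.true_and]
    · rw [if_neg (by simpa using hc), Bool.eq_false_iff.mpr hc, Bool.false_and, if_neg (by simp)]
  rw [hA, hB]
  exact pvFold_eq _ d1.keys [] hnd (by simp)

-- ===== VERDICT (by name: the statement is the Claim_ definition above) =====
theorem positional_intersect_spec : Claim_equal_positional_intersect := by
  intro l1 l2 k _
  unfold Spec_positional_intersect positional_intersect positional_intersect_alt
  exact pvMain (PySem.Dict.ofList l1) (PySem.Dict.ofList l2) k (PySem.Dict.nodup_keys_ofList l1)
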